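-- pv_equiv track=rewrite | github.com/smdsadiq23/erpnext_trackerx_customization | erpnext_trackerx_customization/hooks/grn_inspection_hook.py | determine_inspection_type
-- ===== SOURCE A (Python) =====
-- def determine_inspection_type(material_type):
--     """Determine inspection type based on material type"""
--     material_type_lower = material_type.lower() if material_type else ""
--
--     if any(keyword in material_type_lower for keyword in ['fabric', 'cloth', 'textile']):
--         return "Fabric Inspection"
--     elif any(keyword in material_type_lower for keyword in ['trim', 'button', 'zipper', 'thread']):
--         return "Trims Inspection"
--     elif any(keyword in material_type_lower for keyword in ['accessory', 'accessories', 'label']):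
--         return "Accessories Inspection"
--
--     return None
-- ===== SOURCE B (Python) =====
-- KEYWORDS = [
--     ('fabric', 0), ('cloth', 0), ('textile', 0),
--     ('trim', 1), ('button', 1), ('zipper', 1), ('thread', 1),
--     ('accessory', 2), ('accessories', 2), ('label', 2),
-- ]
-- LABELS = ["Fabric Inspection", "Trims Inspection", "Accessories Inspection"]
--
--
-- def determine_inspection_type(material_type):
--     """Determine inspection type based on material type"""
--     s = material_type.lower() if material_type else ""
--     # single left-to-right scan of the string, keeping the minimal matched priority
--     best = 3
--     for i in range(len(s)):
--         for kw, pri in KEYWORDS: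
--             if pri < best and s.startswith(kw, i):
--                 best = pri
--     return LABELS[best] if best < 3 else None
-- ===== Notes on version B (the rewrite author's own statement) =====
-- stated objective: alternative
-- what changed: Instead of three ordered any(keyword in s) substring passes, B makes a single left-to-right scan over the positions of the lowered string, checking startswith for each (keyword, priority) pair and keeping the minimal matched priority in an accumulator, then indexes a label table.
import Mathlib
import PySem

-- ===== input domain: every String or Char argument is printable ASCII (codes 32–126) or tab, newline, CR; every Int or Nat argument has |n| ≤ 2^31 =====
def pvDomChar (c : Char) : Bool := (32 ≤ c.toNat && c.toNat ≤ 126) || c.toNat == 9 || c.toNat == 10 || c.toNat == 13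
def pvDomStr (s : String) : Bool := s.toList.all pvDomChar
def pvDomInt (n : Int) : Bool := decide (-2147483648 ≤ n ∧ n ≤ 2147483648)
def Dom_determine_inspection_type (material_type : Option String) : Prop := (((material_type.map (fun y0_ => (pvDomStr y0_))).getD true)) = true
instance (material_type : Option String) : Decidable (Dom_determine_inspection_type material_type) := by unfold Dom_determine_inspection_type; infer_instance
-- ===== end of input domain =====

-- B replaces A's three ordered substring passes by a single positional scan that keeps the
-- minimal matched keyword priority in an accumulator (alternative decomposition; same cost).

-- ===== PORT A =====
def determine_inspection_type (material_type : Option String) : Option String :=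
  let material_type_lower :=
    match material_type with
    | some s => if s ≠ "" then PySem.Str.lower s else ""
    | none => ""
  if (["fabric", "cloth", "textile"] : List String).any
      (fun keyword => PySem.Str.isIn keyword material_type_lower) then
    some "Fabric Inspection"
  else if (["trim", "button", "zipper", "thread"] : List String).any
      (fun keyword => PySem.Str.isIn keyword material_type_lower) then
    some "Trims Inspection"
  else if (["accessory", "accessories", "label"] : List String).any
      (fun keyword => PySem.Str.isIn keyword material_type_lower) then
    some "Accessories Inspection"
  else
    none

-- ===== PORT B =====
def pvKeywords : List (List Char × Nat) :=
  [("fabric".toList, 0), ("cloth".toList, 0), ("textile".toList, 0),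
   ("trim".toList, 1), ("button".toList, 1), ("zipper".toList, 1), ("thread".toList, 1),
   ("accessory".toList, 2), ("accessories".toList, 2), ("label".toList, 2)]

def pvLabels : List String := ["Fabric Inspection", "Trims Inspection", "Accessories Inspection"]

-- the inner 'for kw, pri in KEYWORDS' pass at one position i (s.startswith(kw, i) is exact:
-- for 0 ≤ i < len(s) it is 'kw is a prefix of s[i:]', ported as startswith on cs.drop i)
def pvInner (cs : List Char) (i : Nat) (best : Nat) : Nat :=
  pvKeywords.foldl
    (fun b kv => if kv.2 < b ∧ PySem.Chars.startswith (cs.drop i) kv.1 then kv.2 else b) best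

-- the outer 'for i in range(len(s))' scan with accumulator best = 3
def pvScan (cs : List Char) : Nat :=
  (List.range cs.length).foldl (fun b i => pvInner cs i b) 3

def determine_inspection_type_alt (material_type : Option String) : Option String :=
  let s :=
    match material_type with
    | some s => if s ≠ "" then PySem.Str.lower s else ""
    | none => ""
  let best := pvScan s.toList
  if best < 3 then some (pvLabels.getD best "") else none

-- ===== PRECONDITION & SPEC =====
def Spec_determine_inspection_type (material_type : Option String) (out : Option String) : Prop := out = determine_inspection_type_alt material_type
instance (material_type : Option String) (out : Option String) : Decidable (Spec_determine_inspection_type material_type out) := by unfold Spec_determine_inspection_type; infer_instance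

-- ===== CLAIM (what is proved, stated in full; the proofs are below) =====
def Claim_equal_determine_inspection_type : Prop := ∀ (material_type : Option String), Dom_determine_inspection_type material_type → Spec_determine_inspection_type material_type (determine_inspection_type material_type)

-- ===== LEMMAS AND PROOFS =====

-- generic facts about one keyword pass with step 'if pri < best ∧ P kw then pri else best'
theorem foldl_step_le (P : List Char → Bool) (l : List (List Char × Nat)) (b : Nat) :
    l.foldl (fun b kv => if kv.2 < b ∧ P kv.1 then kv.2 else b) b ≤ b := by
  induction l generalizing b with
  | nil => exact le_refl b
  | cons kv rest ih =>
      simp only [List.foldl_cons]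
      split_ifs with h
      · exact le_trans (ih kv.2) (le_of_lt h.1)
      · exact ih b

theorem foldl_step_hit (P : List Char → Bool) (l : List (List Char × Nat)) (b : Nat)
    (kv : List Char × Nat) (hm : kv ∈ l) (hs : P kv.1 = true) :
    l.foldl (fun b kv => if kv.2 < b ∧ P kv.1 then kv.2 else b) b ≤ kv.2 := by
  induction l generalizing b with
  | nil => cases hm
  | cons hd rest ih =>
      simp only [List.foldl_cons]
      rcases List.mem_cons.mp hm with rfl | hm'
      · split_ifs with h
        · exact foldl_step_le P rest kv.2
        · have hb : b ≤ kv.2 := by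
            rcases not_and_or.mp h with h1 | h2
            · omega
            · exact absurd hs h2
          exact le_trans (foldl_step_le P rest b) hb
      · exact ih _ hm'

theorem foldl_step_lb (P : List Char → Bool) (l : List (List Char × Nat)) (v b : Nat)
    (hall : ∀ kv ∈ l, P kv.1 = true → v ≤ kv.2) (hb : v ≤ b) :
    v ≤ l.foldl (fun b kv => if kv.2 < b ∧ P kv.1 then kv.2 else b) b := by
  induction l generalizing b with
  | nil => exact hb
  | cons kv rest ih =>
      simp only [List.foldl_cons]
      split_ifs with h
      · exact ih _ (fun k hk hp => hall k (List.mem_cons_of_mem _ hk) hp)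
          (hall kv (List.mem_cons_self) h.2)
      · exact ih _ (fun k hk hp => hall k (List.mem_cons_of_mem _ hk) hp) hb

theorem pvInner_le (cs : List Char) (i b : Nat) : pvInner cs i b ≤ b := by
  unfold pvInner
  exact foldl_step_le (fun kw => PySem.Chars.startswith (cs.drop i) kw) pvKeywords b

theorem pvInner_hit (cs : List Char) (i b : Nat) (kv : List Char × Nat)
    (hm : kv ∈ pvKeywords) (hs : PySem.Chars.startswith (cs.drop i) kv.1 = true) :
    pvInner cs i b ≤ kv.2 := by
  unfold pvInner
  exact foldl_step_hit (fun kw => PySem.Chars.startswith (cs.drop i) kw) pvKeywords b kv hm hs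

theorem pvInner_lb (cs : List Char) (i : Nat) (v b : Nat)
    (hall : ∀ kv ∈ pvKeywords, PySem.Chars.startswith (cs.drop i) kv.1 = true → v ≤ kv.2)
    (hb : v ≤ b) : v ≤ pvInner cs i b := by
  unfold pvInner
  exact foldl_step_lb (fun kw => PySem.Chars.startswith (cs.drop i) kw) pvKeywords v b hall hb

-- the outer scan never increases best
theorem pvOuter_le (cs : List Char) (l : List Nat) (b : Nat) :
    l.foldl (fun b i => pvInner cs i b) b ≤ b := by
  induction l generalizing b with
  | nil => exact le_refl b
  | cons i rest ih =>
      simp only [List.foldl_cons]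
      exact le_trans (ih (pvInner cs i b)) (pvInner_le cs i b)

theorem pvOuter_hit (cs : List Char) (l : List Nat) (b i : Nat) (kv : List Char × Nat)
    (hi : i ∈ l) (hm : kv ∈ pvKeywords) (hs : PySem.Chars.startswith (cs.drop i) kv.1 = true) :
    l.foldl (fun b i => pvInner cs i b) b ≤ kv.2 := by
  induction l generalizing b with
  | nil => cases hi
  | cons j rest ih =>
      simp only [List.foldl_cons]
      rcases List.mem_cons.mp hi with rfl | hi'
      · exact le_trans (pvOuter_le cs rest _) (pvInner_hit cs i b kv hm hs)
      · exact ih _ hi'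

theorem pvOuter_lb (cs : List Char) (l : List Nat) (v b : Nat)
    (hall : ∀ i ∈ l, ∀ kv ∈ pvKeywords, PySem.Chars.startswith (cs.drop i) kv.1 = true → v ≤ kv.2)
    (hb : v ≤ b) : v ≤ l.foldl (fun b i => pvInner cs i b) b := by
  induction l generalizing b with
  | nil => exact hb
  | cons j rest ih =>
      simp only [List.foldl_cons]
      exact ih _ (fun i hi => hall i (List.mem_cons_of_mem _ hi))
        (pvInner_lb cs j v b (hall j (List.mem_cons_self)) hb)

-- a keyword matched at some scanned position occurs as a substring
theorem matched_isIn (cs : List Char) (i : Nat) (kw : List Char)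
    (hs : PySem.Chars.startswith (cs.drop i) kw = true) : PySem.Chars.isIn kw cs = true :=
  (PySem.Chars.exists_prefix_drop_iff_isIn kw cs).mp ⟨i, (PySem.Chars.startswith_iff _ _).mp hs⟩

-- a keyword occurring as a substring is matched at a scanned position (keywords are nonempty)
theorem isIn_matched (cs : List Char) (kw : List Char) (hne : kw ≠ [])
    (h : PySem.Chars.isIn kw cs = true) :
    ∃ i ∈ List.range cs.length, PySem.Chars.startswith (cs.drop i) kw = true := by
  obtain ⟨j, hj⟩ := (PySem.Chars.exists_prefix_drop_iff_isIn kw cs).mpr h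
  refine ⟨j, List.mem_range.mpr ?_, (PySem.Chars.startswith_iff _ _).mpr hj⟩
  by_contra hlen
  have : cs.drop j = [] := List.drop_eq_nil_of_le (by omega)
  rw [this] at hj
  exact hne (List.prefix_nil.mp hj)

-- group membership of each table entry
theorem keywords_cases (kv : List Char × Nat) (hm : kv ∈ pvKeywords) :
    (kv.2 = 0 ∧ kv.1 ∈ ["fabric".toList, "cloth".toList, "textile".toList]) ∨
    (kv.2 = 1 ∧ kv.1 ∈ ["trim".toList, "button".toList, "zipper".toList, "thread".toList]) ∨
    (kv.2 = 2 ∧ kv.1 ∈ ["accessory".toList, "accessories".toList, "label".toList]) := by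
  simp only [pvKeywords, List.mem_cons, List.not_mem_nil, or_false] at hm
  rcases hm with rfl | rfl | rfl | rfl | rfl | rfl | rfl | rfl | rfl | rfl <;> simp

-- the scan computes exactly A's if-chain value
theorem scan_eq (cs : List Char) :
    pvScan cs =
      (if (["fabric".toList, "cloth".toList, "textile".toList]).any
          (fun k => PySem.Chars.isIn k cs) then 0
       else if (["trim".toList, "button".toList, "zipper".toList, "thread".toList]).any
          (fun k => PySem.Chars.isIn k cs) then 1
       else if (["accessory".toList, "accessories".toList, "label".toList]).any
          (fun k => PySem.Chars.isIn k cs) then 2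
       else 3) := by
  have bound : ∀ (kw : List Char) (p : Nat), (kw, p) ∈ pvKeywords → kw ≠ [] →
      PySem.Chars.isIn kw cs = true → pvScan cs ≤ p := by
    intro kw p hm hne h
    obtain ⟨i, hi, hs⟩ := isIn_matched cs kw hne h
    exact pvOuter_hit cs _ 3 i (kw, p) hi hm hs
  have lb : ∀ v : Nat, v ≤ 3 →
      (∀ kv ∈ pvKeywords, PySem.Chars.isIn kv.1 cs = true → v ≤ kv.2) → v ≤ pvScan cs := by
    intro v hv hall
    exact pvOuter_lb cs _ v 3 (fun i _ kv hm hs => hall kv hm (matched_isIn cs i kv.1 hs)) hv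
  split_ifs with h0 h1 h2
  · obtain ⟨kw, hkw, hin⟩ := List.any_eq_true.mp h0
    have hle : pvScan cs ≤ 0 := by
      simp only [List.mem_cons, List.not_mem_nil, or_false] at hkw
      rcases hkw with rfl | rfl | rfl <;> exact bound _ 0 (by decide) (by decide) hin
    omega
  · obtain ⟨kw, hkw, hin⟩ := List.any_eq_true.mp h1
    have hle : pvScan cs ≤ 1 := by
      simp only [List.mem_cons, List.not_mem_nil, or_false] at hkw
      rcases hkw with rfl | rfl | rfl | rfl <;> exact bound _ 1 (by decide) (by decide) hin
    have hn0 := List.any_eq_false.mp (Bool.eq_false_iff.mpr h0)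
    have hge : 1 ≤ pvScan cs := by
      refine lb 1 (by omega) ?_
      intro kv hm hin'
      rcases keywords_cases kv hm with ⟨hp, hg⟩ | ⟨hp, _⟩ | ⟨hp, _⟩
      · exact absurd hin' (by simpa using hn0 kv.1 hg)
      · omega
      · omega
    omega
  · obtain ⟨kw, hkw, hin⟩ := List.any_eq_true.mp h2
    have hle : pvScan cs ≤ 2 := by
      simp only [List.mem_cons, List.not_mem_nil, or_false] at hkw
      rcases hkw with rfl | rfl | rfl <;> exact bound _ 2 (by decide) (by decide) hin
    have hn0 := List.any_eq_false.mp (Bool.eq_false_iff.mpr h0)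
    have hn1 := List.any_eq_false.mp (Bool.eq_false_iff.mpr h1)
    have hge : 2 ≤ pvScan cs := by
      refine lb 2 (by omega) ?_
      intro kv hm hin'
      rcases keywords_cases kv hm with ⟨hp, hg⟩ | ⟨hp, hg⟩ | ⟨hp, _⟩
      · exact absurd hin' (by simpa using hn0 kv.1 hg)
      · exact absurd hin' (by simpa using hn1 kv.1 hg)
      · omega
    omega
  · have hn0 := List.any_eq_false.mp (Bool.eq_false_iff.mpr h0)
    have hn1 := List.any_eq_false.mp (Bool.eq_false_iff.mpr h1)
    have hn2 := List.any_eq_false.mp (Bool.eq_false_iff.mpr h2)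
    have hge : 3 ≤ pvScan cs := by
      refine lb 3 (le_refl 3) ?_
      intro kv hm hin'
      rcases keywords_cases kv hm with ⟨_, hg⟩ | ⟨_, hg⟩ | ⟨_, hg⟩
      · exact absurd hin' (by simpa using hn0 kv.1 hg)
      · exact absurd hin' (by simpa using hn1 kv.1 hg)
      · exact absurd hin' (by simpa using hn2 kv.1 hg)
    have hle : pvScan cs ≤ 3 := pvOuter_le cs _ 3
    omega

-- A's if-chain and B's scan-plus-table-lookup agree on any lowered string t
theorem chain_eq (t : String) :
    (if (["fabric", "cloth", "textile"] : List String).any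
        (fun keyword => PySem.Str.isIn keyword t) then
      some "Fabric Inspection"
    else if (["trim", "button", "zipper", "thread"] : List String).any
        (fun keyword => PySem.Str.isIn keyword t) then
      some "Trims Inspection"
    else if (["accessory", "accessories", "label"] : List String).any
        (fun keyword => PySem.Str.isIn keyword t) then
      some "Accessories Inspection"
    else
      none) =
    (if pvScan t.toList < 3 then some (pvLabels.getD (pvScan t.toList) "") else none) := by
  rw [scan_eq t.toList]
  simp only [List.any_cons, List.any_nil, Bool.or_false, PySem.Str.isIn_eq]
  split_ifs <;> simp_all [pvLabels]

-- ===== VERDICT (by name: the statement is the Claim_ definition above) =====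
theorem determine_inspection_type_spec : Claim_equal_determine_inspection_type := by
  intro m _
  unfold Spec_determine_inspection_type determine_inspection_type determine_inspection_type_alt
  exact chain_eq _
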